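-- pv_equiv track=rewrite | github.com/jins408/Algorithm | programmers/Level1/과일장수(while).py | solution
-- ===== SOURCE A (Python) =====
-- def solution(k, m, score):
--     answer = 0
--
--     # 큰 수부터 상자를 몇개 만들 수 있는지 확인
--     score = sorted(score)
--
--     while len(score) > 0:
--         box = []
--         for i in range(len(score)):
--             # for문 전체를 돌기때문에 시간초과나서 len(box)가 m이랑 같을때 break로 끝까지 안보게 해줌
--             if len(box) == m :
--                 break
--             # 오름차순으로 정렬해서 score끝에 제일 큰 수부터 비교하고
--             box.append(score[-1])
--             # pop() 배열의 끝에있는 원소부터 제거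
--             score.pop()
--         # box배열에 전체에서 제일 작은 값찾아서 (최저 사과 점수) x (한 상자에 담긴 사과 개수)해줌
--         if len(box) == m:
--             answer += min(box) * m
--         # pop해준 score길이가 m보다 작은경우 더이상 확인하지 않고 break로 빠져나옴
--         elif len(score) < m:
--             break
--
--     return answer
-- ===== SOURCE B (Python) =====
-- def solution(k, m, score):
--     s = sorted(score, reverse=True)
--     return sum(s[j * m + m - 1] * m for j in range(len(score) // m))
-- ===== Notes on version B (the rewrite author's own statement) =====
-- stated objective: simpler
-- what changed: B replaces A's destructive while/for loop (popping elements one by one into a box and calling min on it) by a single descending sort plus a direct-index sum: the minimum of the j-th full box is read off as s[j*m+m-1], so there is no working-list mutation, no box building and no min scan.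
-- outside the precondition, e.g. on solution(0, 0, []): A returns 0, B raises ZeroDivisionError
import Mathlib
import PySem

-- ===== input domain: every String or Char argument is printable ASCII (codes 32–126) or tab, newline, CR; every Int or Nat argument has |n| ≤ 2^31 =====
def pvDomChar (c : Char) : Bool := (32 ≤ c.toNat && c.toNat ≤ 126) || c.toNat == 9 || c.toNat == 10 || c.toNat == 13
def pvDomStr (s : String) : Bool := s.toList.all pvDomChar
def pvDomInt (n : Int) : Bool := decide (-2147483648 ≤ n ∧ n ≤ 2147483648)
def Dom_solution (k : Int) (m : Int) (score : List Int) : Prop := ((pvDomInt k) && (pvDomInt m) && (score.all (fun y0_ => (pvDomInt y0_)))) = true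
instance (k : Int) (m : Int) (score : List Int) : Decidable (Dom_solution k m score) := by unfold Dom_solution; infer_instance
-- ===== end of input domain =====

-- B groups the descending-sorted scores into len//m full boxes and reads each box's
-- minimum directly by index, instead of A's destructive pop-into-a-box loop.

-- ===== PORT A =====
-- inner 'for i in range(len(score))' loop: n is the remaining iteration count;
-- 'box.append(score[-1]); score.pop()' touch the same (last) element, fused into one pop? match
-- (pop? is none only on an empty list, where Python's score[-1] would raise — unreachable here
-- because the for runs at most len(score) iterations).
def pvLoopFor (n : Nat) (m : Int) (box : List Int) (score : List Int) : List Int × List Int :=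
  match n with
  | 0 => (box, score)
  | n + 1 =>
    if (box.length : Int) = m then (box, score)
    else
      match PySem.List.pop? score (-1) with
      | none => (box, score)            -- unreachable (score nonempty at every reached iteration)
      | some (x, rest) => pvLoopFor n m (box ++ [x]) rest

-- the 'while len(score) > 0' loop; fuel = initial length + 1 bounds the iteration count
-- (each pass with m ≠ 0 strictly shrinks score or exits). min([]).getD 0 is only reached
-- when m = 0, where Python raises ValueError — excluded by Pre_.
def pvLoopWhile (fuel : Nat) (m : Int) (score : List Int) (answer : Int) : Int :=
  match fuel with
  | 0 => answer
  | fuel + 1 =>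
    if score.length > 0 then
      let r := pvLoopFor score.length m [] score
      if (r.1.length : Int) = m then
        pvLoopWhile fuel m r.2 (answer + (PySem.List.min? r.1 (fun x => x)).getD 0 * m)
      else if (r.2.length : Int) < m then answer
      else pvLoopWhile fuel m r.2 answer
    else answer

def solution (k : Int) (m : Int) (score : List Int) : Int :=
  let s := PySem.List.sorted score (fun x => x) false
  pvLoopWhile (s.length + 1) m s 0

-- ===== PORT B =====
-- s[j*m+m-1] is always in range for j < len(score)//m (m ≠ 0 by Pre_), so .getD 0 is never the default.
def solution_alt (k : Int) (m : Int) (score : List Int) : Int :=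
  let s := PySem.List.sorted score (fun x => x) true
  (PySem.List.pyRange 0 (PySem.Int.floordiv (score.length : Int) m) 1).foldl
    (fun acc j => acc + (PySem.List.pyGet? s (j * m + m - 1)).getD 0 * m) 0

-- ===== PRECONDITION & SPEC =====
-- Pre_ excludes m = 0 only: there A raises ValueError (min of an empty box) on every nonempty
-- score and returns 0 just on the empty list, while B's len(score)//m raises ZeroDivisionError.
def Pre_solution (k : Int) (m : Int) (score : List Int) : Prop := m ≠ 0
instance (k : Int) (m : Int) (score : List Int) : Decidable (Pre_solution k m score) := by unfold Pre_solution; infer_instance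
def pvWitness_solution : Int × Int × List Int := (4, 3, [4, 1, 2, 2, 4, 2, 4, 2, 1])

def Spec_solution (k : Int) (m : Int) (score : List Int) (out : Int) : Prop := out = solution_alt k m score
instance (k : Int) (m : Int) (score : List Int) (out : Int) : Decidable (Spec_solution k m score out) := by unfold Spec_solution; infer_instance

-- ===== CLAIM (what is proved, stated in full; the proofs are below) =====
def Claim_equal_solution : Prop := ∀ (k : Int) (m : Int) (score : List Int), Dom_solution k m score → Pre_solution k m score → Spec_solution k m score (solution k m score)

-- ===== LEMMAS AND PROOFS =====

-- the sum B computes, as a map-sum over the descending list r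
def pvBsum (m : Int) (r : List Int) : Int :=
  ((PySem.List.pyRange 0 (PySem.Int.floordiv (r.length : Int) m) 1).map
    (fun j => (PySem.List.pyGet? r (j * m + m - 1)).getD 0 * m)).sum

-- a full box stops the for loop at once
lemma pvLoopFor_full (n : Nat) (m : Int) (box score : List Int)
    (h : (box.length : Int) = m) : pvLoopFor n m box score = (box, score) := by
  cases n with
  | zero => rfl
  | succ n => simp [pvLoopFor, h]

-- m < 0: the box never fills, the for loop drains score completely
lemma pvLoopFor_neg (m : Int) (hm : m < 0) :
    ∀ (n : Nat) (score box : List Int), score.length ≤ n →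
      pvLoopFor n m box score = (box ++ score.reverse, []) := by
  intro n
  induction n with
  | zero =>
    intro score box h
    have : score = [] := List.eq_nil_of_length_eq_zero (Nat.le_zero.mp h)
    subst this; simp [pvLoopFor]
  | succ n ih =>
    intro score box h
    have hne : ¬ ((box.length : Int) = m) := by
      have : (0:Int) ≤ box.length := Int.natCast_nonneg _
      omega
    rcases List.eq_nil_or_concat score with rfl | ⟨t, x, rfl⟩
    · simp [pvLoopFor, hne, PySem.List.pop?]
    · simp only [pvLoopFor, hne, if_false, List.concat_eq_append, PySem.List.pop?_last]
      rw [ih t (box ++ [x]) (by simp at h ⊢; omega)]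
      simp

-- m > 0: the for loop pops min(m - |box|, |score|) elements off the end of score
lemma pvLoopFor_pos (m : Int) (hm : 0 < m) :
    ∀ (n : Nat) (score box : List Int), score.length ≤ n → (box.length : Int) < m →
      pvLoopFor n m box score =
        if score.length + box.length ≤ m.toNat then (box ++ score.reverse, [])
        else (box ++ (score.drop (score.length + box.length - m.toNat)).reverse,
              score.take (score.length + box.length - m.toNat)) := by
  intro n
  induction n with
  | zero =>
    intro score box h hb
    have hs : score = [] := List.eq_nil_of_length_eq_zero (Nat.le_zero.mp h)
    subst hs
    rw [if_pos (by omega)]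
    simp [pvLoopFor]
  | succ n ih =>
    intro score box h hb
    have hne : ¬ ((box.length : Int) = m) := by omega
    rcases List.eq_nil_or_concat score with rfl | ⟨t, x, rfl⟩
    · rw [if_pos (by simp; omega)]
      simp [pvLoopFor, hne, PySem.List.pop?]
    · simp only [pvLoopFor, hne, if_false, List.concat_eq_append, PySem.List.pop?_last]
      have hlen : (t ++ [x]).length = t.length + 1 := by simp
      by_cases hfull : (box.length : Int) + 1 = m
      · -- box becomes full after this pop
        rw [pvLoopFor_full _ _ _ _ (by simp; omega)]
        by_cases hsmall : t.length = 0
        · have ht : t = [] := List.eq_nil_of_length_eq_zero hsmall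
          subst ht
          rw [if_pos (by simp; omega)]
          simp
        · rw [if_neg (by simp; omega)]
          have hidx : (t ++ [x]).length + box.length - m.toNat = t.length := by simp; omega
          rw [hidx, Prod.mk.injEq]
          refine ⟨?_, ?_⟩
          · rw [List.drop_left]
            simp
          · rw [List.take_left]
      · -- box still not full
        rw [ih t (box ++ [x]) (by simp at h; omega) (by simp; omega)]
        have harith : t.length + (box ++ [x]).length = (t ++ [x]).length + box.length := by
          simp; omega
        rw [harith]
        by_cases hsm : (t ++ [x]).length + box.length ≤ m.toNat
        · rw [if_pos hsm, if_pos hsm]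
          simp
        · rw [if_neg hsm, if_neg hsm]
          have hto : 1 ≤ m.toNat - box.length := by omega
          have hidxle : (t ++ [x]).length + box.length - m.toNat ≤ t.length := by simp; omega
          rw [Prod.mk.injEq]
          refine ⟨?_, ?_⟩
          · rw [List.drop_append_of_le_length hidxle]
            simp
          · rw [List.take_append_of_le_length hidxle]

-- first extremal element of a descending list is its last element (all minima are equal Ints)
lemma pvMin_desc (l : List Int) (h : l ≠ []) (hp : l.Pairwise (fun a b : Int => b ≤ a)) :
    PySem.List.min? l (fun x => x) = some (l.getLast h) := by
  obtain ⟨v, hv⟩ : ∃ v, PySem.List.min? l (fun x => x) = some v := by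
    cases hm : PySem.List.min? l (fun x => x) with
    | none => exact absurd ((PySem.List.min?_eq_none_iff l _).mp hm) h
    | some v => exact ⟨v, rfl⟩
  have hmem := PySem.List.min?_mem hv
  have hmin := PySem.List.min?_isMin hv
  have h1 : v ≤ l.getLast h := hmin _ (List.getLast_mem h)
  have h2 : l.getLast h ≤ v := by
    obtain ⟨i, hi, rfl⟩ := List.getElem_of_mem hmem
    have hlast : l.getLast h = l[l.length - 1] := List.getLast_eq_getElem h
    rcases Nat.lt_or_ge i (l.length - 1) with hlt | hge
    · rw [hlast]
      exact List.pairwise_iff_getElem.mp hp i (l.length - 1) hi (by omega) hlt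
    · rw [hlast]
      apply le_of_eq
      congr 1
      omega
  rw [hv, le_antisymm h1 h2]

-- descending sort = reverse of ascending sort (on Int values)
lemma pvSorted_desc_eq_reverse (xs : List Int) :
    PySem.List.sorted xs (fun x => x) true = (PySem.List.sorted xs (fun x => x) false).reverse := by
  apply PySem.List.eq_of_perm_of_pairwise_le_of_injective (fun x : Int => -x)
    (fun a b hab => by simpa using hab)
  · exact (PySem.List.sorted_perm xs _ true).trans
      ((PySem.List.sorted_perm xs _ false).symm.trans (List.reverse_perm _).symm)
  · have := PySem.List.sorted_pairwise_rev xs (fun x : Int => x)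
    exact this.imp (by intro a b hab; simpa using hab)
  · rw [List.pairwise_reverse]
    have := PySem.List.sorted_pairwise xs (fun x : Int => x)
    exact this.imp (by intro a b hab; simpa using hab)

-- peel the first block off B's sum
lemma pv_idx_shift (m : Int) (hm : 0 < m) (r : List Int) (k : Nat) :
    PySem.List.pyGet? r ((1 + (k : Int)) * m + m - 1)
      = PySem.List.pyGet? (r.drop m.toNat) ((k : Int) * m + m - 1) := by
  have hk0 : (0:Int) ≤ (k : Int) * m := mul_nonneg (Int.natCast_nonneg k) hm.le
  have hi : (0:Int) ≤ (k : Int) * m + m - 1 := by omega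
  have hexp : (1 + (k : Int)) * m + m - 1 = m + ((k : Int) * m + m - 1) := by ring
  rw [PySem.List.pyGet?_of_nonneg _ hi, PySem.List.pyGet?_of_nonneg _ (by omega : (0:Int) ≤ (1 + (k:Int)) * m + m - 1),
      List.getElem?_drop]
  congr 1
  rw [hexp]
  omega

lemma pvBsum_step (m : Int) (hm : 0 < m) (r : List Int) (h : m.toNat ≤ r.length) :
    pvBsum m r = (PySem.List.pyGet? r (m - 1)).getD 0 * m + pvBsum m (r.drop m.toNat) := by
  set c := PySem.Int.floordiv (r.length : Int) m with hcdef
  have hc1 : 1 ≤ c := by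
    have := (PySem.Int.floordiv_eq_iff_of_pos (q := c) hm).mp rfl
    by_contra hlt
    have hc0 : c ≤ 0 := by omega
    have : (c + 1) * m ≤ 1 * m := by
      apply mul_le_mul_of_nonneg_right _ hm.le
      omega
    omega
  have hdroplen : ((r.drop m.toNat).length : Int) = (r.length : Int) - m := by
    simp [List.length_drop]
    omega
  have hc' : PySem.Int.floordiv ((r.drop m.toNat).length : Int) m = c - 1 := by
    rw [hdroplen, PySem.Int.floordiv_eq_ediv_of_pos hm, hcdef, PySem.Int.floordiv_eq_ediv_of_pos hm]
    have h2 : (r.length : Int) - m = (r.length : Int) + (-1) * m := by ring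
    rw [h2, Int.add_mul_ediv_right _ _ (ne_of_gt hm)]
    ring
  unfold pvBsum
  rw [hc', ← hcdef]
  rw [PySem.List.pyRange_one_cons (by omega : (0:Int) < c)]
  rw [List.map_cons, List.sum_cons]
  have e0 : (0:Int) * m + m - 1 = m - 1 := by ring
  rw [e0]
  congr 1
  rw [show (0:Int) + 1 = 1 from by ring, PySem.List.pyRange_one 1 c, PySem.List.pyRange_one 0 (c - 1)]
  rw [List.map_map, List.map_map]
  have hlen : (c - 1).toNat = (c - 1 - 0).toNat := by omega
  rw [← hlen]
  congr 1
  apply List.map_congr_left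
  intro k hk
  simp only [Function.comp_apply]
  rw [zero_add, pv_idx_shift m hm r k]

lemma pvBsum_small (m : Int) (hm : 0 < m) (r : List Int) (h : r.length < m.toNat) :
    pvBsum m r = 0 := by
  have hc : PySem.Int.floordiv (r.length : Int) m = 0 := by
    rw [PySem.Int.floordiv_eq_iff_of_pos hm]
    constructor
    · simp
    · simp
      omega
  simp [pvBsum, hc]

-- main loop lemma for m > 0, by strong induction on the length of the sorted list
lemma pvWhile_pos (m : Int) (hm : 0 < m) :
    ∀ (n : Nat) (s : List Int), s.length = n → s.Pairwise (· ≤ ·) →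
      ∀ (fuel : Nat) (a : Int), n ≤ fuel →
        pvLoopWhile fuel m s a = a + pvBsum m s.reverse := by
  intro n
  induction n using Nat.strong_induction_on with
  | _ n ih =>
    intro s hlen hsort fuel a hfuel
    have hmt : m.toNat = m := Int.toNat_of_nonneg hm.le
    by_cases h0 : s.length = 0
    · have hs : s = [] := List.eq_nil_of_length_eq_zero h0
      subst hs
      have hrhs : pvBsum m ([] : List Int) = 0 := by
        apply pvBsum_small m hm
        simp
        omega
      cases fuel with
      | zero => simp [pvLoopWhile, hrhs]
      | succ f => simp [pvLoopWhile, hrhs]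
    · obtain ⟨f, rfl⟩ : ∃ f, fuel = f + 1 := by
        cases fuel with
        | zero => omega
        | succ f => exact ⟨f, rfl⟩
      simp only [pvLoopWhile]
      rw [if_pos (by omega)]
      by_cases hlt : s.length < m.toNat
      · -- fewer than m scores remain: partial box, loop exits with answer unchanged
        have hr0 : pvLoopFor s.length m [] s = (s.reverse, []) := by
          rw [pvLoopFor_pos m hm s.length s [] (le_refl _) (by simp; omega)]
          rw [if_pos (by simp; omega)]
          simp
        rw [hr0]
        rw [if_neg (by simp; omega), if_pos (by simp; omega)]
        rw [pvBsum_small m hm s.reverse (by simpa using hlt)]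
        ring
      · -- a full box: its minimum is s[n - m], then recurse on the first n - m scores
        rw [Nat.not_lt] at hlt
        have hr : pvLoopFor s.length m [] s
            = ((s.drop (s.length - m.toNat)).reverse, s.take (s.length - m.toNat)) := by
          rw [pvLoopFor_pos m hm s.length s [] (le_refl _) (by simp; omega)]
          by_cases heq : s.length = m.toNat
          · rw [if_pos (by simp; omega)]
            rw [heq, Nat.sub_self]
            simp
          · rw [if_neg (by simp; omega)]
            simp
        rw [hr]
        have hboxlen : (s.drop (s.length - m.toNat)).reverse.length = m.toNat := by
          simp
          omega
        rw [if_pos (by rw [hboxlen]; exact_mod_cast hmt)]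
        have hdropne : s.drop (s.length - m.toNat) ≠ [] := by
          apply List.ne_nil_of_length_pos
          simp
          omega
        have hrevne : (s.drop (s.length - m.toNat)).reverse ≠ [] := by
          simpa using hdropne
        have hdesc : (s.drop (s.length - m.toNat)).reverse.Pairwise (fun a b : Int => b ≤ a) := by
          rw [List.pairwise_reverse]
          exact hsort.sublist (List.drop_sublist _ _)
        rw [pvMin_desc _ hrevne hdesc]
        have hvidx : (s.drop (s.length - m.toNat)).reverse.getLast hrevne
            = s[s.length - m.toNat]'(by omega) := by
          rw [List.getLast_reverse]
          exact List.head_drop hdropne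
        have htlen : (s.take (s.length - m.toNat)).length = s.length - m.toNat := by
          simp
        rw [ih (s.length - m.toNat) (by omega) _ htlen
              (hsort.sublist (List.take_sublist _ _)) f _ (by omega)]
        -- peel the first block off B's sum on the reversed (descending) list
        rw [pvBsum_step m hm s.reverse (by simp; omega)]
        have hget : (PySem.List.pyGet? s.reverse (m - 1)).getD 0
            = s[s.length - m.toNat]'(by omega) := by
          rw [PySem.List.pyGet?_of_nonneg _ (by omega : (0:Int) ≤ m - 1)]
          have hidx : (m - 1).toNat < s.reverse.length := by simp; omega
          rw [List.getElem?_eq_getElem hidx]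
          simp only [Option.getD_some]
          rw [List.getElem_reverse]
          congr 1
          simp
          omega
        have hdropeq : s.reverse.drop m.toNat = (s.take (s.length - m.toNat)).reverse :=
          List.drop_reverse
        rw [hget, hvidx, hdropeq]
        simp only [Option.getD_some]
        ring

-- ===== VERDICT (by name: the statement is the Claim_ definition above) =====
-- m < 0: the for loop drains score, the box is never full, A returns the initial answer 0
lemma pvLoopWhile_nil (fuel : Nat) (m a : Int) : pvLoopWhile fuel m [] a = a := by
  cases fuel <;> simp [pvLoopWhile]

lemma pvWhile_neg (m : Int) (hm : m < 0) (s : List Int) :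
    pvLoopWhile (s.length + 1) m s 0 = 0 := by
  cases s with
  | nil => simp [pvLoopWhile]
  | cons x t =>
    have hfor : pvLoopFor (t.length + 1) m [] (x :: t) = ((x :: t).reverse, []) := by
      simpa using pvLoopFor_neg m hm (x :: t).length (x :: t) [] (le_refl _)
    simp [pvLoopWhile, hfor, pvLoopWhile_nil]
    omega

-- n // m ≤ 0 when n ≥ 0 and m < 0
lemma pvFloordiv_nonpos (n m : Int) (hn : 0 ≤ n) (hm : m < 0) :
    PySem.Int.floordiv n m ≤ 0 := by
  have h1 := PySem.Int.floordiv_mul_add_mod n m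
  have h2 := PySem.Int.mod_neg_bounds n hm
  by_contra hf
  have hf1 : 1 ≤ PySem.Int.floordiv n m := by omega
  have h3 : PySem.Int.floordiv n m * m ≤ 1 * m :=
    mul_le_mul_of_nonpos_right hf1 hm.le
  omega

theorem solution_spec : Claim_equal_solution := by
  unfold Claim_equal_solution Spec_solution Pre_solution
  intro k m score _ hm
  unfold solution solution_alt
  rcases lt_trichotomy m 0 with hneg | hzero | hpos
  · -- m < 0: A returns 0, and len(score) // m ≤ 0 makes B's range empty
    rw [pvWhile_neg m hneg]
    rw [PySem.List.pyRange_one_eq_nil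
      (by simpa using pvFloordiv_nonpos (score.length : Int) m (by positivity) hneg)]
    rfl
  · exact absurd hzero hm
  · -- m > 0: both sides equal the block sum over the descending list
    rw [pvWhile_pos m hpos (PySem.List.sorted score (fun x => x) false).length _ rfl
      (by simpa using PySem.List.sorted_pairwise score (fun x : Int => x))
      _ 0 (by omega)]
    rw [PySem.List.foldl_add
      (g := fun j => (PySem.List.pyGet? (PySem.List.sorted score (fun x => x) true) (j * m + m - 1)).getD 0 * m)]
    rw [pvSorted_desc_eq_reverse score]
    unfold pvBsum
    have hlen : ((PySem.List.sorted score (fun x => x) false).reverse.length : Int)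
        = (score.length : Int) := by
      simp [PySem.List.length_sorted]
    rw [hlen]
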